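-- pv_equiv track=rewrite | github.com/groowe/sudoku-mine | sudoku4.py | preprint
-- ===== SOURCE A (Python) =====
-- def preprint(line):
--     s = str(line)
--     s = s.replace("None"," ").replace("[","|")
--     s = s.replace("]","|")
--     line = s
--     newline = ""
--     countchar = 0
--     checkchar = ","
--     for char in line:
--         if char == checkchar:
--             countchar +=1
--             if countchar % 3 == 0:
--                 newline +='|'
--             else:
--                 newline +=' '
--         else:
--             newline+=char
--     return newline
-- ===== SOURCE B (Python) =====
-- def preprint(line):
--     s = str(line)
--     s = s.replace("None", " ").replace("[", "|")
--     s = s.replace("]", "|")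
--     toks = s.split(",")
--     out = toks[0]
--     for i, t in enumerate(toks[1:], 1):
--         out += ('|' if i % 3 == 0 else ' ') + t
--     return out
-- ===== Notes on version B (the rewrite author's own statement) =====
-- stated objective: alternative
-- what changed: B splits the rendered string on ',' once and rejoins the comma-delimited tokens with an index-based separator ('|' at every third comma, ' ' otherwise), instead of A's character-by-character loop maintaining a running comma counter.
import Mathlib
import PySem

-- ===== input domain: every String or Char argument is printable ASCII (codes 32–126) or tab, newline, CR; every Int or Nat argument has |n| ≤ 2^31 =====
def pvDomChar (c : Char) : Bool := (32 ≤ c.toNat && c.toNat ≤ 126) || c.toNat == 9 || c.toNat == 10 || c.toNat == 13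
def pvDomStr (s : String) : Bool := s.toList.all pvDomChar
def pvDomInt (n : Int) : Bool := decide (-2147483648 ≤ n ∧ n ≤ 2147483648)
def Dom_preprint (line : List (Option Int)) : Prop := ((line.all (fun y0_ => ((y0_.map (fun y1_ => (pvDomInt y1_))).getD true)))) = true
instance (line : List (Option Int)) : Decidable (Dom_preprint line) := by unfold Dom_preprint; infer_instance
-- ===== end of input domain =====

-- B rebuilds the output from the comma-split tokens of s with an index-based separator
-- instead of A's per-character loop with a running comma counter (objective: alternative).

-- shared helper: s = str(line).replace("None"," ").replace("[","|").replace("]","|"),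
-- exactly the first four lines both Pythons share (str(list) = '[' ++ ', '.join(items) ++ ']')
def pvElemRepr (x : Option Int) : List Char :=
  match x with
  | none => "None".toList
  | some n => PySem.Int.toChars n

def pvS (line : List (Option Int)) : List Char :=
  let s := '[' :: PySem.Chars.join ", ".toList (line.map pvElemRepr) ++ [']']
  let s := PySem.Chars.replace s "None".toList " ".toList
  let s := PySem.Chars.replace s "[".toList "|".toList
  PySem.Chars.replace s "]".toList "|".toList

-- ===== PORT A =====
def preprint (line : List (Option Int)) : String :=
  let s := pvS line
  let res := s.foldl (fun (st : List Char × Nat) char =>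
    if char = ',' then
      let countchar := st.2 + 1
      (st.1 ++ [if countchar % 3 = 0 then '|' else ' '], countchar)
    else (st.1 ++ [char], st.2)) ([], 0)
  String.mk res.1

-- ===== PORT B =====
-- s.split(",") ported by hand, exact: '' splits to [''], each ',' starts a new piece,
-- any other char is prepended to the first piece of the split of the tail
def splitComma : List Char → List (List Char)
  | [] => [[]]
  | c :: t =>
    if c = ',' then [] :: splitComma t
    else (c :: (splitComma t).headD []) :: (splitComma t).drop 1

def sepFor (i : Nat) : Char := if i % 3 = 0 then '|' else ' '

-- the loop: for i, t in enumerate(toks[1:], 1): out += sep(i) + t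
def joinRest : List (List Char) → Nat → List Char
  | [], _ => []
  | t :: ts, i => (sepFor (i + 1) :: t) ++ joinRest ts (i + 1)

def preprint_alt (line : List (Option Int)) : String :=
  let toks := splitComma (pvS line)
  String.mk (toks.headD [] ++ joinRest (toks.drop 1) 0)

-- ===== PRECONDITION & SPEC =====
def Spec_preprint (line : List (Option Int)) (out : String) : Prop := out = preprint_alt line
instance (line : List (Option Int)) (out : String) : Decidable (Spec_preprint line out) := by unfold Spec_preprint; infer_instance

-- ===== CLAIM (what is proved, stated in full; the proofs are below) =====
def Claim_equal_preprint : Prop := ∀ (line : List (Option Int)), Dom_preprint line → Spec_preprint line (preprint line)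

-- ===== LEMMAS AND PROOFS =====

-- A's loop without the accumulator
def render : List Char → Nat → List Char
  | [], _ => []
  | c :: t, cnt =>
    if c = ',' then sepFor (cnt + 1) :: render t (cnt + 1) else c :: render t cnt

lemma foldA_eq (cs : List Char) : ∀ (acc : List Char) (cnt : Nat),
    (cs.foldl (fun (st : List Char × Nat) char =>
      if char = ',' then
        let countchar := st.2 + 1
        (st.1 ++ [if countchar % 3 = 0 then '|' else ' '], countchar)
      else (st.1 ++ [char], st.2)) (acc, cnt)).1 = acc ++ render cs cnt := by
  induction cs with
  | nil => intro acc cnt; simp [render]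
  | cons c t ih =>
    intro acc cnt
    by_cases h : c = ','
    · simp [h, render, sepFor, ih]
    · simp [h, render, ih]

lemma splitComma_ne_nil (cs : List Char) : splitComma cs ≠ [] := by
  cases cs with
  | nil => simp [splitComma]
  | cons c t => by_cases h : c = ',' <;> simp [splitComma, h]

lemma render_eq_join (cs : List Char) : ∀ cnt : Nat,
    render cs cnt = (splitComma cs).headD [] ++ joinRest ((splitComma cs).drop 1) cnt := by
  induction cs with
  | nil => intro cnt; simp [render, splitComma, joinRest]
  | cons c t ih =>
    intro cnt
    obtain ⟨h, hs, hht⟩ : ∃ h hs, splitComma t = h :: hs := by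
      cases hsp : splitComma t with
      | nil => exact absurd hsp (splitComma_ne_nil t)
      | cons h hs => exact ⟨h, hs, rfl⟩
    by_cases hc : c = ','
    · simp [render, splitComma, hc, ih, hht, joinRest]
    · simp [render, splitComma, hc, ih, hht]

theorem preprint_eq_alt (line : List (Option Int)) : preprint line = preprint_alt line := by
  show String.mk _ = String.mk _
  rw [foldA_eq, render_eq_join, List.nil_append]

-- ===== VERDICT (by name: the statement is the Claim_ definition above) =====
theorem preprint_spec : Claim_equal_preprint := by
  intro line _
  unfold Spec_preprint
  exact preprint_eq_alt line
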